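-- pv_equiv track=rewrite | github.com/RakshitaRB/Team_2_Budgetwise_Ai_Forecasting_tool | code-files/utils/categorization.py | categorize_transaction_fallback
-- ===== SOURCE A (Python) =====
-- def categorize_transaction_fallback(description):
--     """Simple fallback for categorization"""
--     if not description:
--         return "Other"
--     desc_lower = description.lower()
--
--     if any(word in desc_lower for word in ['grocery', 'food', 'supermarket']):
--         return "Groceries"
--     elif any(word in desc_lower for word in ['restaurant', 'cafe', 'coffee']):
--         return "Dining"
--     elif any(word in desc_lower for word in ['salary', 'paycheck']):
--         return "Salary"
--     else:
--         return "Other"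
-- ===== SOURCE B (Python) =====
-- KEYWORD_PRIORITY = {
--     "grocery": 0, "food": 0, "supermarket": 0,
--     "restaurant": 1, "cafe": 1, "coffee": 1,
--     "salary": 2, "paycheck": 2,
-- }
-- CATEGORIES = ["Groceries", "Dining", "Salary"]
--
--
-- def categorize_transaction_fallback(description):
--     """Fallback categorization: best (lowest-priority) keyword hit wins."""
--     if not description:
--         return "Other"
--     desc_lower = description.lower()
--     best = min((p for w, p in KEYWORD_PRIORITY.items() if w in desc_lower),
--                default=None)
--     return "Other" if best is None else CATEGORIES[best]
-- ===== Notes on version B (the rewrite author's own statement) =====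
-- stated objective: alternative
-- what changed: Instead of testing keyword groups sequentially with early returns, B flattens all keywords into one keyword-to-priority dict, computes the minimum priority among all matching keywords in a single full pass with no early exit, and indexes a category table by that minimum.
import Mathlib
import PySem

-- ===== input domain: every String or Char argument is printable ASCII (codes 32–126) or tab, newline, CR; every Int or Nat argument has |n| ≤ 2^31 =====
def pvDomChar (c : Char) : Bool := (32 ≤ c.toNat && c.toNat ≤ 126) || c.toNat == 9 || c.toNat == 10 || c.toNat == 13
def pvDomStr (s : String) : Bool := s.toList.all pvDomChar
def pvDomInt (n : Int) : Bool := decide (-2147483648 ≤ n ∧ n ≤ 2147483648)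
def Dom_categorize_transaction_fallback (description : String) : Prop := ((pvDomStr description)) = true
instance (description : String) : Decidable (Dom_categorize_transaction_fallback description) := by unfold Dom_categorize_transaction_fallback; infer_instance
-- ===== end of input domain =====

-- B flattens the keywords into one keyword→priority table and takes the minimum
-- matched priority in a single pass (no early exit); same result, different shape.

-- ===== PORT A =====
-- Port of A: empty guard, then the if/elif chain of any-substring checks.
def categorize_transaction_fallback (description : String) : String :=
  if description == "" then "Other"
  else
    let desc_lower := PySem.Str.lower description
    if ["grocery", "food", "supermarket"].any (fun word => PySem.Str.isIn word desc_lower) then "Groceries"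
    else if ["restaurant", "cafe", "coffee"].any (fun word => PySem.Str.isIn word desc_lower) then "Dining"
    else if ["salary", "paycheck"].any (fun word => PySem.Str.isIn word desc_lower) then "Salary"
    else "Other"

-- ===== PORT B =====
-- flat keyword → priority dict (insertion order of Source B's KEYWORD_PRIORITY)
def pvKeywordPriority : List (String × Int) :=
  [("grocery", 0), ("food", 0), ("supermarket", 0),
   ("restaurant", 1), ("cafe", 1), ("coffee", 1),
   ("salary", 2), ("paycheck", 2)]

def pvCategories : List String := ["Groceries", "Dining", "Salary"]

-- min(gen, default=None): fold the matching priorities into an Option minimum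
def pvMinOpt (acc : Option Int) (p : Int) : Option Int :=
  match acc with
  | none => some p
  | some q => some (min q p)

def categorize_transaction_fallback_alt (description : String) : String :=
  if description == "" then "Other"
  else
    let desc_lower := PySem.Str.lower description
    let best := pvKeywordPriority.foldl
      (fun acc wp => if PySem.Str.isIn wp.1 desc_lower then pvMinOpt acc wp.2 else acc) none
    match best with
    | none => "Other"
    | some p => (PySem.List.pyGet? pvCategories p).getD "Other"  -- CATEGORIES[best]; p ∈ {0,1,2} always

-- ===== PRECONDITION & SPEC =====
def Spec_categorize_transaction_fallback (description : String) (out : String) : Prop := out = categorize_transaction_fallback_alt description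
instance (description : String) (out : String) : Decidable (Spec_categorize_transaction_fallback description out) := by unfold Spec_categorize_transaction_fallback; infer_instance

-- ===== CLAIM =====
def Claim_equal_categorize_transaction_fallback : Prop := ∀ (description : String), Dom_categorize_transaction_fallback description → Spec_categorize_transaction_fallback description (categorize_transaction_fallback description)

-- ===== LEMMAS AND PROOFS =====

-- proof-only helpers: both programs as functions of the eight substring tests
def pvAform (b1 b2 b3 b4 b5 b6 b7 b8 : Bool) : String :=
  if b1 || (b2 || (b3 || false)) then "Groceries"
  else if b4 || (b5 || (b6 || false)) then "Dining"
  else if b7 || (b8 || false) then "Salary"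
  else "Other"

def pvBfold (b1 b2 b3 b4 b5 b6 b7 b8 : Bool) : Option Int :=
  let a1 := if b1 then pvMinOpt none 0 else none
  let a2 := if b2 then pvMinOpt a1 0 else a1
  let a3 := if b3 then pvMinOpt a2 0 else a2
  let a4 := if b4 then pvMinOpt a3 1 else a3
  let a5 := if b5 then pvMinOpt a4 1 else a4
  let a6 := if b6 then pvMinOpt a5 1 else a5
  let a7 := if b7 then pvMinOpt a6 2 else a6
  if b8 then pvMinOpt a7 2 else a7

def pvCout (o : Option Int) : String :=
  match o with
  | none => "Other"
  | some p => (PySem.List.pyGet? ["Groceries", "Dining", "Salary"] p).getD "Other"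

theorem pvAB (b1 b2 b3 b4 b5 b6 b7 b8 : Bool) :
    pvAform b1 b2 b3 b4 b5 b6 b7 b8 = pvCout (pvBfold b1 b2 b3 b4 b5 b6 b7 b8) := by
  cases b1 <;> cases b2 <;> cases b3 <;> cases b4 <;> cases b5 <;> cases b6 <;>
    cases b7 <;> cases b8 <;> rfl

-- ===== VERDICT =====
theorem categorize_transaction_fallback_spec : Claim_equal_categorize_transaction_fallback := by
  intro description _
  unfold Spec_categorize_transaction_fallback categorize_transaction_fallback
    categorize_transaction_fallback_alt
  by_cases h : description == ""
  · simp [h]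
  · simp only [h, if_false, Bool.false_eq_true]
    exact pvAB _ _ _ _ _ _ _ _
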